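-- pv_equiv track=rewrite | github.com/kase1111-hash/TorusFold | loops/taxonomy.py | _find_ss_runs
-- ===== SOURCE A (Python) =====
-- from typing import Dict, List, Optional, Tuple
--
-- def _find_ss_runs(basins: List[Optional[str]], target: str,
--                   min_flank: int) -> List[Tuple[int, int]]:
--     """Find runs of >= min_flank consecutive residues in the target basin.
--
--     Returns list of (start_idx, end_idx) inclusive.
--     """
--     runs = []
--     start = None
--     count = 0
--     for i, b in enumerate(basins):
--         if b == target:
--             if start is None:
--                 start = i
--             count += 1
--         else:
--             if start is not None and count >= min_flank:
--                 runs.append((start, start + count - 1))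
--             start = None
--             count = 0
--     if start is not None and count >= min_flank:
--         runs.append((start, start + count - 1))
--     return runs
-- ===== SOURCE B (Python) =====
-- from typing import List, Optional, Tuple
--
-- def _find_ss_runs(basins: List[Optional[str]], target: str,
--                   min_flank: int) -> List[Tuple[int, int]]:
--     """Staged vectorised passes: build a boolean mask, detect run starts and
--     run ends by comparing the mask with its shifted copies, then pair them up
--     and keep the pairs that are long enough."""
--     mask = [b == target for b in basins]
--     starts = [i for i, (cur, prev) in enumerate(zip(mask, [False] + mask))
--               if cur and not prev]
--     ends = [i for i, (cur, nxt) in enumerate(zip(mask, mask[1:] + [False]))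
--             if cur and not nxt]
--     return [(s, e) for s, e in zip(starts, ends) if e - s + 1 >= min_flank]
-- ===== Notes on version B (the rewrite author's own statement) =====
-- stated objective: alternative
-- what changed: Replaces A's single-pass start/count state machine with staged passes: a boolean mask, run-start and run-end index lists obtained by comparing the mask against its shifted copies, then zipping starts with ends and filtering by length.
import Mathlib
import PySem

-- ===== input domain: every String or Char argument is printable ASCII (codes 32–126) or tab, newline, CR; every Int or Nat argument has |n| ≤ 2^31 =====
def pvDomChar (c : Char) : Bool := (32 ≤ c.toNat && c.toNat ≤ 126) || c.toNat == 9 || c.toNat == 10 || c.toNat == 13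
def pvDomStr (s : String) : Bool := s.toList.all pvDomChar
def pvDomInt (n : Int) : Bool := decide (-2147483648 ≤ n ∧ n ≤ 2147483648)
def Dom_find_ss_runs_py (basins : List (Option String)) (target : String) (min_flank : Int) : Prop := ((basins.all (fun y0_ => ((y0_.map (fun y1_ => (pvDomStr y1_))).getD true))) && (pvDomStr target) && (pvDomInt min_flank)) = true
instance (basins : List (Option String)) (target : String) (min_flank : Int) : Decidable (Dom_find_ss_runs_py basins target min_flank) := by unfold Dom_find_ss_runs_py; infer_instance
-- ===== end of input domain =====

-- B replaces A's single-pass start/count state machine by staged passes: a boolean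
-- mask, run-start and run-end index lists from the mask vs its shifted copies,
-- then zip + length filter (objective: alternative decomposition, same O(n) cost).

-- ===== PORT A =====
-- A's loop state: (runs, start, count, i); enumerate's index i is carried in the state.
def pvStepA (target : String) (min_flank : Int)
    (acc : List (Int × Int) × Option Int × Int × Int) (b : Option String) :
    List (Int × Int) × Option Int × Int × Int :=
  let (runs, start, count, i) := acc
  if b == some target then
    (runs, (match start with | none => some i | some s => some s), count + 1, i + 1)
  else
    ((match start with
      | some s => if min_flank ≤ count then runs ++ [(s, s + count - 1)] else runs
      | none => runs), none, 0, i + 1)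

-- the trailing 'if start is not None and count >= min_flank' flush after the loop
def pvFlushA (min_flank : Int) (st : List (Int × Int) × Option Int × Int × Int) :
    List (Int × Int) :=
  match st.2.1 with
  | some s => if min_flank ≤ st.2.2.1 then st.1 ++ [(s, s + st.2.2.1 - 1)] else st.1
  | none => st.1

def find_ss_runs_py (basins : List (Option String)) (target : String) (min_flank : Int) : List (Int × Int) :=
  pvFlushA min_flank (basins.foldl (pvStepA target min_flank) ([], none, 0, 0))

-- ===== PORT B =====
-- mask = [b == target for b in basins]
-- starts = [i for i,(cur,prev) in enumerate(zip(mask, [False]+mask)) if cur and not prev]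
-- ends   = [i for i,(cur,nxt)  in enumerate(zip(mask, mask[1:]+[False])) if cur and not nxt]
-- return [(s,e) for s,e in zip(starts, ends) if e - s + 1 >= min_flank]
def find_ss_runs_py_alt (basins : List (Option String)) (target : String) (min_flank : Int) : List (Int × Int) :=
  let mask := basins.map (fun b => b == some target)
  let starts := ((PySem.List.enumerate (mask.zip (false :: mask)) 0).filter
      (fun q => q.2.1 && !q.2.2)).map (·.1)
  let ends := ((PySem.List.enumerate (mask.zip (PySem.List.slice mask (some 1) none ++ [false])) 0).filter
      (fun q => q.2.1 && !q.2.2)).map (·.1)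
  (starts.zip ends).filter (fun p => decide (min_flank ≤ p.2 - p.1 + 1))

-- ===== PRECONDITION & SPEC =====
def Spec_find_ss_runs_py (basins : List (Option String)) (target : String) (min_flank : Int) (out : List (Int × Int)) : Prop := out = find_ss_runs_py_alt basins target min_flank
instance (basins : List (Option String)) (target : String) (min_flank : Int) (out : List (Int × Int)) : Decidable (Spec_find_ss_runs_py basins target min_flank out) := by unfold Spec_find_ss_runs_py; infer_instance

-- ===== CLAIM (what is proved, stated in full; the proofs are below) =====
def Claim_equal_find_ss_runs_py : Prop := ∀ (basins : List (Option String)) (target : String) (min_flank : Int), Dom_find_ss_runs_py basins target min_flank → Spec_find_ss_runs_py basins target min_flank (find_ss_runs_py basins target min_flank)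

-- ===== LEMMAS AND PROOFS =====

-- proof-side intermediate: the list as maximal runs of equal values, (value, run length)
def pvGroupRuns : List (Option String) → List (Option String × Nat)
  | [] => []
  | x :: xs =>
    (x, (xs.takeWhile (· == x)).length + 1) :: pvGroupRuns (xs.dropWhile (· == x))
termination_by l => l.length
decreasing_by
  simp only [List.length_cons]
  exact Nat.lt_succ_of_le (List.length_dropWhile_le _ _)

-- proof-side intermediate fold over the groups (both programs are reduced to it)
def pvStepG (target : String) (min_flank : Int)
    (acc : List (Int × Int) × Int) (kg : Option String × Nat) :
    List (Int × Int) × Int :=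
  let (runs, i) := acc
  let length : Int := (kg.2 : Int)
  ((if kg.1 == some target && decide (min_flank ≤ length) then
      runs ++ [(i, i + length - 1)] else runs), i + length)

-- proof-side recursion computing B's starts list: prev value p, next index j
def pvS (p : Bool) (j : Int) : List Bool → List Int
  | [] => []
  | c :: m => (if c && !p then [j] else []) ++ pvS c (j + 1) m

-- proof-side recursion computing B's ends list (peeks at the successor, padded false)
def pvE (j : Int) : List Bool → List Int
  | [] => []
  | [c] => if c then [j] else []
  | c :: d :: m => (if c && !d then [j] else []) ++ pvE (j + 1) (d :: m)

theorem pvDropWhile_head {a : Type} (p : a → Bool) :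
    ∀ (l : List a) (y : a) (ys : List a), l.dropWhile p = y :: ys → p y = false := by
  intro l
  induction l with
  | nil => intro y ys h; simp [List.dropWhile] at h
  | cons b bs ih =>
    intro y ys h
    rw [List.dropWhile] at h
    cases hb : p b with
    | true => rw [hb] at h; exact ih y ys h
    | false => rw [hb] at h; simp at h; rw [← h.1]; exact hb

-- ==== A = group fold ====

theorem pvFoldA_match (target : String) (min_flank : Int) :
    ∀ (l : List (Option String)), (∀ b ∈ l, b = some target) →
    ∀ (runs : List (Int × Int)) (s c i : Int),
      l.foldl (pvStepA target min_flank) (runs, some s, c, i)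
        = (runs, some s, c + (l.length : Int), i + (l.length : Int)) := by
  intro l
  induction l with
  | nil => intro _ runs s c i; simp
  | cons x xs ih =>
    intro h runs s c i
    have hx : x = some target := h x (by simp)
    simp only [List.foldl_cons, pvStepA, hx, beq_self_eq_true, if_pos]
    rw [ih (fun b hb => h b (by simp [hb]))]
    simp only [Prod.mk.injEq, List.length_cons, true_and]
    push_cast
    omega

theorem pvFoldA_nomatch (target : String) (min_flank : Int) :
    ∀ (l : List (Option String)), (∀ b ∈ l, b ≠ some target) →
    ∀ (runs : List (Int × Int)) (i : Int),
      l.foldl (pvStepA target min_flank) (runs, none, 0, i)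
        = (runs, none, 0, i + (l.length : Int)) := by
  intro l
  induction l with
  | nil => intro _ runs i; simp
  | cons x xs ih =>
    intro h runs i
    have hx : ¬ (x == some target) = true := by
      simpa using h x (by simp)
    simp only [List.foldl_cons, pvStepA, hx, if_neg, Bool.false_eq_true, not_false_iff]
    rw [ih (fun b hb => h b (by simp [hb]))]
    simp only [Prod.mk.injEq, List.length_cons, true_and]
    push_cast
    omega

theorem pvAMain (target : String) (min_flank : Int) :
    ∀ (l : List (Option String)) (runs : List (Int × Int)) (i : Int),
      pvFlushA min_flank (l.foldl (pvStepA target min_flank) (runs, none, 0, i))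
        = ((pvGroupRuns l).foldl (pvStepG target min_flank) (runs, i)).1 := by
  intro l
  induction l using pvGroupRuns.induct with
  | case1 => intro runs i; simp [pvFlushA, pvGroupRuns]
  | case2 x xs ih =>
    intro runs i
    set tk := xs.takeWhile (· == x) with htk
    set dp := xs.dropWhile (· == x) with hdp
    have hxs : xs = tk ++ dp := by rw [htk, hdp, List.takeWhile_append_dropWhile]
    have htkmem : ∀ b ∈ tk, b = x := by
      intro b hb
      have := List.mem_takeWhile_imp hb
      simpa using this
    have hgr : pvGroupRuns (x :: xs) = (x, tk.length + 1) :: pvGroupRuns dp := by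
      rw [pvGroupRuns]
    rw [hgr, List.foldl_cons, List.foldl_cons, hxs, List.foldl_append]
    by_cases hx : x = some target
    · have h0 : pvStepA target min_flank (runs, none, 0, i) x = (runs, some i, 1, i + 1) := by
        simp [pvStepA, hx]
      have hstep : pvStepG target min_flank (runs, i) (x, tk.length + 1)
          = ((if min_flank ≤ (tk.length : Int) + 1 then
                runs ++ [(i, i + ((tk.length : Int) + 1) - 1)] else runs),
             i + ((tk.length : Int) + 1)) := by
        simp only [pvStepG, hx, beq_self_eq_true, Bool.true_and]
        push_cast
        simp
      rw [h0, pvFoldA_match target min_flank tk (fun b hb => (htkmem b hb).trans hx), hstep]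
      cases hdpc : dp with
      | nil =>
        simp only [List.foldl_nil, pvFlushA, pvGroupRuns]
        split_ifs with h h' h' <;>
          first
            | rfl
            | omega
            | (simp only [List.append_cancel_left_eq, List.cons.injEq, Prod.mk.injEq,
                and_true, true_and]; omega)
      | cons y ys =>
        have hy : ¬ (y == x) = true := by
          have := pvDropWhile_head (· == x) xs y ys (by rw [← hdp, hdpc])
          simp at this
          simp [this]
        have hy' : ¬ (y == some target) = true := by rw [hx] at hy; exact hy
        have h2 : ∀ (R : List (Int × Int)) (c j : Int),
            pvStepA target min_flank (R, some i, c, j) y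
              = ((if min_flank ≤ c then R ++ [(i, i + c - 1)] else R), none, 0, j + 1) := by
          intro R c j
          simp only [pvStepA, hy', if_neg, Bool.false_eq_true, not_false_iff]
        have h3 : ∀ (R : List (Int × Int)) (j : Int),
            pvStepA target min_flank (R, none, 0, j) y = (R, none, 0, j + 1) := by
          intro R j
          simp only [pvStepA, hy', if_neg, Bool.false_eq_true, not_false_iff]
        rw [List.foldl_cons, h2, ← h3, ← List.foldl_cons, ← hdpc, ih]
        have hpair : (((if min_flank ≤ 1 + (tk.length : Int) then
                runs ++ [(i, i + (1 + (tk.length : Int)) - 1)] else runs) : List (Int × Int)),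
              i + 1 + (tk.length : Int))
            = (((if min_flank ≤ (tk.length : Int) + 1 then
                runs ++ [(i, i + ((tk.length : Int) + 1) - 1)] else runs) : List (Int × Int)),
              i + ((tk.length : Int) + 1)) := by
          simp only [Prod.mk.injEq]
          constructor
          · split_ifs with h h' h' <;>
              first
                | rfl
                | omega
                | (simp only [List.append_cancel_left_eq, List.cons.injEq, Prod.mk.injEq,
                    and_true, true_and]; omega)
          · omega
        rw [hpair]
    · have hx' : ∀ b ∈ tk, b ≠ some target := by
        intro b hb
        rw [htkmem b hb]
        exact hx
      have h0 : pvStepA target min_flank (runs, none, 0, i) x = (runs, none, 0, i + 1) := by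
        have : ¬ (x == some target) = true := by simpa using hx
        simp only [pvStepA, this, if_neg, Bool.false_eq_true, not_false_iff]
      have hstep : pvStepG target min_flank (runs, i) (x, tk.length + 1)
          = (runs, i + 1 + (tk.length : Int)) := by
        have hb : (x == some target) = false := by simpa using hx
        simp only [pvStepG, hb, Bool.false_and, if_neg, Bool.false_eq_true, not_false_iff,
          Prod.mk.injEq, true_and]
        push_cast
        omega
      rw [h0, pvFoldA_nomatch target min_flank tk hx', hstep, ih]

-- ==== B = group fold ====

-- B's starts comprehension computes pvS
theorem pvS_spec :
    ∀ (m : List Bool) (p : Bool) (j : Int),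
      ((PySem.List.enumerate (m.zip (p :: m)) j).filter (fun q => q.2.1 && !q.2.2)).map (·.1)
        = pvS p j m := by
  intro m
  induction m with
  | nil => intro p j; simp [pvS]
  | cons c m' ih =>
    intro p j
    rw [List.zip_cons_cons, PySem.List.enumerate_cons, pvS]
    have htail := ih c (j + 1)
    cases hc : (c && !p) with
    | true => simp [hc, htail]
    | false => simp [hc, htail]

-- B's ends comprehension computes pvE
theorem pvE_spec :
    ∀ (j : Int) (m : List Bool),
      ((PySem.List.enumerate (m.zip (m.tail ++ [false])) j).filter (fun q => q.2.1 && !q.2.2)).map (·.1)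
        = pvE j m := by
  intro j m
  induction j, m using pvE.induct with
  | case1 j => simp [pvE]
  | case2 j =>
    rw [List.tail_cons, List.nil_append, List.zip_cons_cons, List.zip_nil_left,
      PySem.List.enumerate_cons, PySem.List.enumerate_nil, pvE]
    simp
  | case3 j c hc =>
    have hcf : c = false := by cases c <;> simp_all
    subst hcf
    rw [List.tail_cons, List.nil_append, List.zip_cons_cons, List.zip_nil_left,
      PySem.List.enumerate_cons, PySem.List.enumerate_nil, pvE]
    simp
  | case4 j c d m' ih =>
    rw [List.tail_cons, List.cons_append, List.zip_cons_cons, PySem.List.enumerate_cons, pvE]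
    rw [List.tail_cons] at ih
    cases hc : (c && !d) with
    | true =>
      rw [List.filter_cons_of_pos (by simpa using hc), List.map_cons, ih, ← hc]
      simp
    | false =>
      rw [List.filter_cons_of_neg (by simpa using hc), ih, ← hc]
      simp
      intro h1
      cases d <;> simp_all

-- pvS / pvE over a run of `false`s: nothing emitted, index advances
theorem pvS_false_repl :
    ∀ (k : Nat) (j : Int) (r : List Bool),
      pvS false j (List.replicate k false ++ r) = pvS false (j + (k : Int)) r := by
  intro k
  induction k with
  | zero => intro j r; simp
  | succ k ih =>
    intro j r
    rw [List.replicate_succ, List.cons_append, pvS, ih]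
    simp
    congr 1
    omega

theorem pvE_false_cons (j : Int) (r : List Bool) :
    pvE j (false :: r) = pvE (j + 1) r := by
  cases r with
  | nil => simp [pvE]
  | cons d r' => rw [pvE]; simp

theorem pvE_false_repl :
    ∀ (k : Nat) (j : Int) (r : List Bool),
      pvE j (List.replicate k false ++ r) = pvE (j + (k : Int)) r := by
  intro k
  induction k with
  | zero => intro j r; simp
  | succ k ih =>
    intro j r
    rw [List.replicate_succ, List.cons_append, pvE_false_cons, ih]
    congr 1
    push_cast
    omega

-- hypothesis on the tail after a target run: empty, or starts with a non-target residue
def pvTail (r : List Bool) : Prop := r = [] ∨ ∃ r', r = false :: r'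

theorem pvS_true_after :
    ∀ (r : List Bool), pvTail r → ∀ (j : Int), pvS true j r = pvS false j r := by
  intro r hr j
  rcases hr with h | ⟨r', h⟩ <;> subst h
  · rfl
  · rw [pvS, pvS]; simp

theorem pvS_true_aux :
    ∀ (k : Nat) (j : Int) (r : List Bool), pvTail r →
      pvS true j (List.replicate k true ++ r) = pvS false (j + (k : Int)) r := by
  intro k
  induction k with
  | zero => intro j r hr; simpa using pvS_true_after r hr j
  | succ k ih =>
    intro j r hr
    rw [List.replicate_succ, List.cons_append, pvS]
    simp only [Bool.not_true, Bool.and_false, if_neg, Bool.false_eq_true, not_false_iff,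
      List.nil_append]
    rw [ih (j + 1) r hr]
    congr 1
    push_cast
    omega

theorem pvS_true_repl (k : Nat) (j : Int) (r : List Bool) (hr : pvTail r) :
    pvS false j (List.replicate (k + 1) true ++ r)
      = j :: pvS false (j + (k : Int) + 1) r := by
  rw [List.replicate_succ, List.cons_append, pvS, pvS_true_aux k (j + 1) r hr]
  simp only [Bool.and_true, Bool.not_false, if_pos, List.singleton_append, List.cons.injEq,
    true_and]
  congr 1
  omega

theorem pvE_true_repl :
    ∀ (k : Nat) (j : Int) (r : List Bool), pvTail r →
      pvE j (List.replicate (k + 1) true ++ r)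
        = (j + (k : Int)) :: pvE (j + (k : Int) + 1) r := by
  intro k
  induction k with
  | zero =>
    intro j r hr
    rcases hr with h | ⟨r', h⟩ <;> subst h
    · simp [pvE]
    · rw [List.replicate_one, List.cons_append, List.nil_append, pvE]
      simp
  | succ k ih =>
    intro j r hr
    rw [List.replicate_succ, List.cons_append]
    have h2 : List.replicate (k + 1) true ++ r = true :: (List.replicate k true ++ r) := by
      rw [List.replicate_succ, List.cons_append]
    rw [h2, pvE]
    simp only [Bool.not_true, Bool.and_false, if_neg, Bool.false_eq_true, not_false_iff,
      List.nil_append]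
    rw [← h2, ih (j + 1) r hr]
    simp only [List.cons.injEq]
    constructor
    · push_cast; omega
    · congr 1; push_cast; omega

-- the mask of a constant run is a replicate
theorem pvMask_const (target : String) :
    ∀ (l : List (Option String)) (x : Option String), (∀ b ∈ l, b = x) →
      l.map (fun b => b == some target) = List.replicate l.length (x == some target) := by
  intro l
  induction l with
  | nil => intro x _; simp
  | cons y ys ih =>
    intro x h
    rw [List.map_cons, h y (by simp), ih x (fun b hb => h b (by simp [hb]))]
    simp [List.replicate_succ]

-- group fold = zip of pvS and pvE filtered by length
theorem pvBMain (target : String) (min_flank : Int) :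
    ∀ (l : List (Option String)) (runs : List (Int × Int)) (i : Int),
      ((pvGroupRuns l).foldl (pvStepG target min_flank) (runs, i)).1
        = runs ++ (((pvS false i (l.map (fun b => b == some target))).zip
              (pvE i (l.map (fun b => b == some target)))).filter
            (fun p => decide (min_flank ≤ p.2 - p.1 + 1))) := by
  intro l
  induction l using pvGroupRuns.induct with
  | case1 => intro runs i; simp [pvGroupRuns, pvS, pvE]
  | case2 x xs ih =>
    intro runs i
    set tk := xs.takeWhile (· == x) with htk
    set dp := xs.dropWhile (· == x) with hdp
    have hxs : xs = tk ++ dp := by rw [htk, hdp, List.takeWhile_append_dropWhile]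
    have htkmem : ∀ b ∈ tk, b = x := by
      intro b hb
      have := List.mem_takeWhile_imp hb
      simpa using this
    have hgr : pvGroupRuns (x :: xs) = (x, tk.length + 1) :: pvGroupRuns dp := by
      rw [pvGroupRuns]
    have hmask : (x :: xs).map (fun b => b == some target)
        = List.replicate (tk.length + 1) (x == some target)
            ++ dp.map (fun b => b == some target) := by
      rw [hxs, List.map_cons, List.map_append,
        pvMask_const target tk x htkmem, List.replicate_succ, List.cons_append]
    rw [hgr, List.foldl_cons, hmask]
    by_cases hx : x = some target
    · have hxb : (x == some target) = true := by simp [hx]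
      have htl : pvTail (dp.map (fun b => b == some target)) := by
        cases hdpc : dp with
        | nil => left; simp
        | cons y ys =>
          right
          have hy : (y == x) = false := pvDropWhile_head (· == x) xs y ys (by rw [← hdp, hdpc])
          refine ⟨ys.map (fun b => b == some target), ?_⟩
          rw [List.map_cons]
          congr 1
          rw [← hx]
          exact hy
      rw [hxb, pvS_true_repl tk.length i _ htl, pvE_true_repl tk.length i _ htl,
        List.zip_cons_cons, List.filter_cons]
      have hcond : (decide (min_flank ≤ (i + (tk.length : Int)) - i + 1))
          = (decide (min_flank ≤ ((tk.length + 1 : Nat) : Int))) := by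
        simp only [decide_eq_decide]
        push_cast
        omega
      have hstep : pvStepG target min_flank (runs, i) (x, tk.length + 1)
          = ((if min_flank ≤ ((tk.length + 1 : Nat) : Int) then
                runs ++ [(i, i + (tk.length : Int))] else runs),
             i + (tk.length : Int) + 1) := by
        simp only [pvStepG, hxb, Bool.true_and]
        have e1 : i + ((tk.length + 1 : Nat) : Int) - 1 = i + (tk.length : Int) := by
          push_cast; omega
        have e2 : i + ((tk.length + 1 : Nat) : Int) = i + (tk.length : Int) + 1 := by
          push_cast; omega
        by_cases h : min_flank ≤ ((tk.length + 1 : Nat) : Int)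
        · rw [if_pos (by simpa using h), if_pos h, e1, e2]
        · rw [if_neg (by simpa using h), if_neg h, e2]
      rw [hstep]
      by_cases h : min_flank ≤ ((tk.length + 1 : Nat) : Int)
      · rw [if_pos h, ih]
        rw [hcond, decide_eq_true h]
        simp
      · rw [if_neg h, ih]
        rw [hcond, decide_eq_false h]
        simp
    · have hxb : (x == some target) = false := by simpa using hx
      have hstep : pvStepG target min_flank (runs, i) (x, tk.length + 1)
          = (runs, i + (tk.length : Int) + 1) := by
        simp only [pvStepG, hxb, Bool.false_and, if_neg, Bool.false_eq_true, not_false_iff,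
          Prod.mk.injEq, true_and]
        push_cast
        omega
      have e2 : i + ((tk.length + 1 : Nat) : Int) = i + (tk.length : Int) + 1 := by
        push_cast; omega
      rw [hxb, pvS_false_repl (tk.length + 1) i _, pvE_false_repl (tk.length + 1) i _,
        hstep, ih, e2]

-- ===== VERDICT (by name: the statement is the Claim_ definition above) =====
theorem find_ss_runs_py_spec : Claim_equal_find_ss_runs_py := by
  intro basins target min_flank _
  show find_ss_runs_py basins target min_flank = find_ss_runs_py_alt basins target min_flank
  have hB : find_ss_runs_py_alt basins target min_flank
      = (((((PySem.List.enumerate ((basins.map (fun b => b == some target)).zip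
              (false :: basins.map (fun b => b == some target))) 0).filter
            (fun q => q.2.1 && !q.2.2)).map (·.1)).zip
          ((((PySem.List.enumerate ((basins.map (fun b => b == some target)).zip
              (PySem.List.slice (basins.map (fun b => b == some target)) (some 1) none
                ++ [false])) 0).filter
            (fun q => q.2.1 && !q.2.2)).map (·.1)))).filter
        (fun p => decide (min_flank ≤ p.2 - p.1 + 1))) := rfl
  rw [hB, PySem.List.slice_from_one, pvS_spec, pvE_spec]
  unfold find_ss_runs_py
  rw [pvAMain target min_flank basins [] 0, pvBMain target min_flank basins [] 0,
    List.nil_append]
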